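-- pv_equiv track=rewrite | github.com/lidia-tech/benchmarkdown | benchmarkdown/metrics/textstruct.py | disconnected_sparse_graph
-- ===== SOURCE A (Python) =====
-- from collections import defaultdict
--
-- def disconnected_sparse_graph(headers):
--     """ Build a parent->direct-children mapping (sparse) from headers list:
--         headers: list of (line_num, level, header)
--         Returns dict: {parent_line_num: [child_line_nums], ...}
--     """
--     graph = defaultdict(list)
--     stack = []
--
--     for line_num, level, header in headers:
--         # Pop until we find the FIRST descendant
--         while stack and stack[-1][1] >= level:
--             stack.pop()
--         if stack:
--             parent_line, parent_level = stack[-1]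
--             graph[parent_line].append(line_num)
--
--         stack.append((line_num, level))
--
--         # Ensure node exists in graph (even if no children)
--         if line_num not in graph:
--             graph[line_num] = []
--     return dict(graph)
-- ===== SOURCE B (Python) =====
-- def disconnected_sparse_graph(headers):
--     """ Build a parent->direct-children mapping (sparse) from headers list:
--         headers: list of (line_num, level, header)
--         Returns dict: {parent_line_num: [child_line_nums], ...}
--     """
--     graph = {}
--     for line_num, _level, _header in headers:
--         if line_num not in graph:
--             graph[line_num] = []
--     for i, (line_num, level, _header) in enumerate(headers):
--         # parent = nearest earlier header with strictly smaller level
--         for j in range(i - 1, -1, -1):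
--             if headers[j][1] < level:
--                 graph[headers[j][0]].append(line_num)
--                 break
--     return graph
-- ===== Notes on version B (the rewrite author's own statement) =====
-- stated objective: alternative
-- what changed: Replaces the monotonic stack with a two-pass dict build: first pass registers every header's key, second pass finds each header's parent by scanning backwards for the nearest earlier header with strictly smaller level.
import Mathlib
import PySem

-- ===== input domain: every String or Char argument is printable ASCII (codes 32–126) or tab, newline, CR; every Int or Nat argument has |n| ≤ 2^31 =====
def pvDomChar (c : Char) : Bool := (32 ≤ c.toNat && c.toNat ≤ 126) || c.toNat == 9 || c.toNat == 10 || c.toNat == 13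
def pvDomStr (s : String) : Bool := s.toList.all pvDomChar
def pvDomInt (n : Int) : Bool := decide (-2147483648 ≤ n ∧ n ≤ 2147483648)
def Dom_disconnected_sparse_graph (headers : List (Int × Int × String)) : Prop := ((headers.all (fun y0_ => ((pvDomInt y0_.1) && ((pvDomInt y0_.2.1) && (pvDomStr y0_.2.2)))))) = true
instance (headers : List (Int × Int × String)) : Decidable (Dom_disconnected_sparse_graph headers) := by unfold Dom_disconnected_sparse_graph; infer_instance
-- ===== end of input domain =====

-- B replaces A's monotonic stack by a two-pass build (register all keys, then find each
-- header's parent by a backward scan for the nearest strictly smaller level): alternative, not faster.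

-- ===== PORT A =====
-- Python's stack has its top at the END; we keep the top at the HEAD, so
-- 'while stack and stack[-1][1] >= level: stack.pop()' is this head recursion.
def dsgPopA (level : Int) : List (Int × Int) → List (Int × Int)
  | [] => []
  | (ln, lv) :: rest => if lv ≥ level then dsgPopA level rest else (ln, lv) :: rest

-- one iteration of A's loop body (defaultdict 'graph[p].append(x)' = insert of getD ++ [x])
def dsgStepA (st : PySem.Dict Int (List Int) × List (Int × Int)) (h : Int × Int × String) :
    PySem.Dict Int (List Int) × List (Int × Int) :=
  let stack := dsgPopA h.2.1 st.2
  let graph :=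
    match stack with
    | (pl, _) :: _ => st.1.insert pl (st.1.getD pl [] ++ [h.1])
    | [] => st.1
  let graph := if graph.contains h.1 then graph else graph.insert h.1 []
  (graph, (h.1, h.2.1) :: stack)

def disconnected_sparse_graph (headers : List (Int × Int × String)) : List (Int × List Int) :=
  (headers.foldl dsgStepA (PySem.Dict.empty, [])).1.items

-- ===== PORT B =====
-- first pass: graph[line_num] = [] for unseen line numbers
def dsgKeyB (d : PySem.Dict Int (List Int)) (h : Int × Int × String) : PySem.Dict Int (List Int) :=
  if d.contains h.1 then d else d.insert h.1 []

-- second pass body: backward scan over headers[0:i], first strictly smaller level wins ('break')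
def dsgChildB (headers : List (Int × Int × String)) (d : PySem.Dict Int (List Int))
    (ih : Int × (Int × Int × String)) : PySem.Dict Int (List Int) :=
  match (headers.take ih.1.toNat).reverse.find? (fun g => g.2.1 < ih.2.2.1) with
  | some g => d.insert g.1 (d.getD g.1 [] ++ [ih.2.1])
  | none => d

def disconnected_sparse_graph_alt (headers : List (Int × Int × String)) : List (Int × List Int) :=
  ((PySem.List.enumerate headers).foldl (dsgChildB headers)
      (headers.foldl dsgKeyB PySem.Dict.empty)).items

-- ===== PRECONDITION & SPEC =====
def Spec_disconnected_sparse_graph (headers : List (Int × Int × String)) (out : List (Int × List Int)) : Prop := out = disconnected_sparse_graph_alt headers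
instance (headers : List (Int × Int × String)) (out : List (Int × List Int)) : Decidable (Spec_disconnected_sparse_graph headers out) := by unfold Spec_disconnected_sparse_graph; infer_instance

-- ===== CLAIM (what is proved, stated in full; the proofs are below) =====
def Claim_equal_disconnected_sparse_graph : Prop := ∀ (headers : List (Int × Int × String)), Dom_disconnected_sparse_graph headers → Spec_disconnected_sparse_graph headers (disconnected_sparse_graph headers)

-- ===== LEMMAS AND PROOFS =====

-- the stack A holds after processing a prefix (threaded explicitly)
def dsgStackRun (s : List (Int × Int)) : List (Int × Int × String) → List (Int × Int)
  | [] => s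
  | h :: t => dsgStackRun ((h.1, h.2.1) :: dsgPopA h.2.1 s) t

-- B's second pass rewritten to carry the processed prefix instead of an index
def dsgBRun (pre : List (Int × Int × String)) (rest : List (Int × Int × String))
    (d : PySem.Dict Int (List Int)) : PySem.Dict Int (List Int) :=
  match rest with
  | [] => d
  | h :: t =>
      dsgBRun (pre ++ [h]) t
        (match pre.reverse.find? (fun g => g.2.1 < h.2.1) with
         | some g => d.insert g.1 (d.getD g.1 [] ++ [h.1])
         | none => d)

theorem dsg_popA_popA (l l' : Int) (hll : l ≤ l') (s : List (Int × Int)) :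
    dsgPopA l (dsgPopA l' s) = dsgPopA l s := by
  induction s with
  | nil => rfl
  | cons a r ih =>
      obtain ⟨ln, lv⟩ := a
      by_cases hge : lv ≥ l'
      · rw [show dsgPopA l' ((ln, lv) :: r) = dsgPopA l' r by simp [dsgPopA, hge], ih,
          show dsgPopA l ((ln, lv) :: r) = dsgPopA l r by simp [dsgPopA]; omega]
      · rw [show dsgPopA l' ((ln, lv) :: r) = (ln, lv) :: r by simp [dsgPopA, hge]]

theorem dsg_stackRun_append (s : List (Int × Int)) (xs ys : List (Int × Int × String)) :
    dsgStackRun s (xs ++ ys) = dsgStackRun (dsgStackRun s xs) ys := by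
  induction xs generalizing s with
  | nil => rfl
  | cons h t ih => simpa [dsgStackRun] using ih _

theorem dsg_popA_mem (l : Int) (s : List (Int × Int)) (p : Int × Int) (hp : p ∈ dsgPopA l s) :
    p ∈ s := by
  induction s with
  | nil => simp [dsgPopA] at hp
  | cons a r ih =>
      obtain ⟨ln, lv⟩ := a
      by_cases hge : lv ≥ l
      · simp [dsgPopA, hge] at hp
        exact List.mem_cons_of_mem _ (ih hp)
      · simpa [dsgPopA, hge] using hp

theorem dsg_stackRun_mem (xs : List (Int × Int × String)) (s : List (Int × Int)) (p : Int × Int)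
    (hp : p ∈ dsgStackRun s xs) : p ∈ s ∨ ∃ h ∈ xs, p = (h.1, h.2.1) := by
  induction xs generalizing s with
  | nil => exact Or.inl hp
  | cons h t ih =>
      rcases ih _ hp with hin | ⟨h', hh', rfl⟩
      · rcases List.mem_cons.mp hin with rfl | hin
        · exact Or.inr ⟨h, List.mem_cons_self .., rfl⟩
        · exact Or.inl (dsg_popA_mem _ _ _ hin)
      · exact Or.inr ⟨h', List.mem_cons_of_mem _ hh', rfl⟩

-- stack head after popping = backward scan for the nearest strictly smaller level
theorem dsg_find (pre : List (Int × Int × String)) (l : Int) :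
    (dsgPopA l (dsgStackRun [] pre)).head? =
      (pre.reverse.map (fun h => (h.1, h.2.1))).find? (fun p => p.2 < l) := by
  induction pre using List.reverseRecOn generalizing l with
  | nil => rfl
  | append_singleton pre h ih =>
      rw [show dsgStackRun [] (pre ++ [h]) =
            (h.1, h.2.1) :: dsgPopA h.2.1 (dsgStackRun [] pre) by
          rw [dsg_stackRun_append]; rfl]
      by_cases hlt : h.2.1 < l
      · simp [dsgPopA, show ¬ h.2.1 ≥ l by omega, hlt]
      · rw [show dsgPopA l ((h.1, h.2.1) :: dsgPopA h.2.1 (dsgStackRun [] pre)) =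
              dsgPopA l (dsgPopA h.2.1 (dsgStackRun [] pre)) by
            simp [dsgPopA]; omega]
        rw [dsg_popA_popA l h.2.1 (by omega)]
        simp [hlt, ih]

theorem dsg_foldl_keyB_get? (t : List (Int × Int × String)) (d : PySem.Dict Int (List Int))
    (k : Int) (hk : d.contains k = true) : (t.foldl dsgKeyB d).get? k = d.get? k := by
  induction t generalizing d with
  | nil => rfl
  | cons h t ih =>
      by_cases hc : d.contains h.1 = true
      · simpa [List.foldl_cons, dsgKeyB, hc] using ih d hk
      · have hne : k ≠ h.1 := fun he => hc (he ▸ hk)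
        rw [List.foldl_cons, show dsgKeyB d h = d.insert h.1 [] by simp [dsgKeyB, hc]]
        rw [ih _ (by simp [PySem.Dict.contains_insert, hk]),
          PySem.Dict.get?_insert_of_ne (hne := hne)]

-- two inserts at distinct keys, the first overwriting an existing key: they commute
theorem dsg_insert_swap (d : PySem.Dict Int (List Int)) (pl k : Int) (v : List Int)
    (hpl : d.contains pl = true) (hk : d.contains k = false) :
    (d.insert pl v).insert k [] = (d.insert k []).insert pl v := by
  have hne : k ≠ pl := fun he => by rw [he, hpl] at hk; exact Bool.noConfusion hk
  have h1 : (d.insert pl v).contains k = false := by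
    simp [PySem.Dict.contains_insert, hk, hne]
  have h2 : (d.insert k ([] : List Int)).contains pl = true := by
    simp [PySem.Dict.contains_insert, hpl]
  apply PySem.Dict.ext
  rw [PySem.Dict.items_insert_of_not_contains _ _ h1,
    PySem.Dict.items_insert_of_contains _ _ hpl,
    PySem.Dict.items_insert_of_contains _ _ h2,
    PySem.Dict.items_insert_of_not_contains _ _ hk]
  simp [hne]

-- an overwrite of an existing key commutes with the whole key-registration fold
theorem dsg_comm (t : List (Int × Int × String)) (d : PySem.Dict Int (List Int)) (pl : Int)
    (v : List Int) (hpl : d.contains pl = true) :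
    t.foldl dsgKeyB (d.insert pl v) = (t.foldl dsgKeyB d).insert pl v := by
  induction t generalizing d with
  | nil => rfl
  | cons h t ih =>
      by_cases hc : d.contains h.1 = true
      · rw [List.foldl_cons, List.foldl_cons,
          show dsgKeyB d h = d by simp [dsgKeyB, hc],
          show dsgKeyB (d.insert pl v) h = d.insert pl v by
            simp [dsgKeyB, PySem.Dict.contains_insert, hc]]
        exact ih d hpl
      · have hc' : d.contains h.1 = false := by simpa using hc
        have hne : h.1 ≠ pl := fun he => by rw [he, hpl] at hc'; exact Bool.noConfusion hc'
        rw [List.foldl_cons, List.foldl_cons,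
          show dsgKeyB d h = d.insert h.1 [] by simp [dsgKeyB, hc'],
          show dsgKeyB (d.insert pl v) h = (d.insert pl v).insert h.1 [] by
            simp [dsgKeyB, PySem.Dict.contains_insert, hc', hne],
          dsg_insert_swap d pl h.1 v hpl hc']
        exact ih _ (by simp [PySem.Dict.contains_insert, hpl])

theorem dsg_contains_keyB (d : PySem.Dict Int (List Int)) (h : Int × Int × String) (k : Int)
    (hk : d.contains k = true) : (dsgKeyB d h).contains k = true := by
  by_cases hc : d.contains h.1 = true <;>
    simp [dsgKeyB, hc, PySem.Dict.contains_insert, hk]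

theorem dsg_contains_keyB_self (d : PySem.Dict Int (List Int)) (h : Int × Int × String) :
    (dsgKeyB d h).contains h.1 = true := by
  by_cases hc : d.contains h.1 = true <;>
    simp [dsgKeyB, hc, PySem.Dict.contains_insert_self]

-- A's in-loop append commutes with B's key registration of the current header
theorem dsg_keyB_insert_comm (d : PySem.Dict Int (List Int)) (pl : Int) (v : List Int)
    (h : Int × Int × String) (hpl : d.contains pl = true) :
    dsgKeyB (d.insert pl v) h = (dsgKeyB d h).insert pl v := by
  by_cases hc : d.contains h.1 = true
  · simp [dsgKeyB, hc, PySem.Dict.contains_insert]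
  · have hc' : d.contains h.1 = false := by simpa using hc
    have hne : h.1 ≠ pl := fun he => by rw [he, hpl] at hc'; exact Bool.noConfusion hc'
    rw [show dsgKeyB d h = d.insert h.1 [] by simp [dsgKeyB, hc'],
      show dsgKeyB (d.insert pl v) h = (d.insert pl v).insert h.1 [] by
        simp [dsgKeyB, PySem.Dict.contains_insert, hc', hne],
      dsg_insert_swap d pl h.1 v hpl hc']

theorem dsg_main (rest pre : List (Int × Int × String)) (d : PySem.Dict Int (List Int))
    (hinv : ∀ h ∈ pre, d.contains h.1 = true) :
    (rest.foldl dsgStepA (d, dsgStackRun [] pre)).1 = dsgBRun pre rest (rest.foldl dsgKeyB d) := by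
  induction rest generalizing pre d with
  | nil => rfl
  | cons h t ih =>
      obtain ⟨ln, l, st⟩ := h
      have hstack : (ln, l) :: dsgPopA l (dsgStackRun [] pre) =
          dsgStackRun [] (pre ++ [(ln, l, st)]) := by
        rw [dsg_stackRun_append]; rfl
      have hfind := dsg_find pre l
      rw [List.find?_map] at hfind
      cases hS : dsgPopA l (dsgStackRun [] pre) with
      | nil =>
          rw [hS] at hfind hstack
          have hnone : pre.reverse.find? (fun g => decide (g.2.1 < l)) = none := by
            cases hf : pre.reverse.find? (fun g => decide (g.2.1 < l)) with
            | none => rfl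
            | some g =>
                rw [show List.find? ((fun p : Int × Int => decide (p.2 < l)) ∘
                    (fun h : Int × Int × String => (h.1, h.2.1))) pre.reverse = some g from hf]
                  at hfind
                simp at hfind
          rw [List.foldl_cons,
            show dsgStepA (d, dsgStackRun [] pre) (ln, l, st) =
              (dsgKeyB d (ln, l, st), (ln, l) :: dsgPopA l (dsgStackRun [] pre)) by
            simp [dsgStepA, hS, dsgKeyB],
            hS, hstack, List.foldl_cons]
          rw [ih (pre ++ [(ln, l, st)]) (dsgKeyB d (ln, l, st)) (by
            intro h' hh'
            rcases List.mem_append.mp hh' with hh | hh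
            · exact dsg_contains_keyB _ _ _ (hinv h' hh)
            · simp at hh; subst hh; exact dsg_contains_keyB_self d (ln, l, st))]
          rw [show dsgBRun pre ((ln, l, st) :: t) (t.foldl dsgKeyB (dsgKeyB d (ln, l, st))) =
            dsgBRun (pre ++ [(ln, l, st)]) t (t.foldl dsgKeyB (dsgKeyB d (ln, l, st))) by
            simp [dsgBRun, hnone]]
      | cons p rest' =>
          obtain ⟨pl, plv⟩ := p
          -- the parent key is already registered in d
          have hmem : (pl, plv) ∈ dsgStackRun [] pre :=
            dsg_popA_mem l _ _ (hS ▸ List.mem_cons_self ..)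
          have hpl : d.contains pl = true := by
            rcases dsg_stackRun_mem pre [] (pl, plv) hmem with hin | ⟨h', hh', he⟩
            · simp at hin
            · have : pl = h'.1 := congrArg Prod.fst he
              exact this ▸ hinv h' hh'
          -- the backward scan finds exactly that parent
          rw [hS] at hfind hstack
          have hsome : ∃ g, pre.reverse.find? (fun g => decide (g.2.1 < l)) = some g ∧ g.1 = pl := by
            cases hf : pre.reverse.find? (fun g => decide (g.2.1 < l)) with
            | none =>
                rw [show List.find? ((fun p : Int × Int => decide (p.2 < l)) ∘
                    (fun h : Int × Int × String => (h.1, h.2.1))) pre.reverse = none from hf]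
                  at hfind
                simp at hfind
            | some g =>
                rw [show List.find? ((fun p : Int × Int => decide (p.2 < l)) ∘
                    (fun h : Int × Int × String => (h.1, h.2.1))) pre.reverse = some g from hf]
                  at hfind
                simp only [Option.map_some, List.head?_cons, Option.some.injEq] at hfind
                exact ⟨g, rfl, (congrArg Prod.fst hfind).symm⟩
          obtain ⟨g, hg, hgpl⟩ := hsome
          set v : List Int := d.getD pl [] ++ [ln] with hv
          rw [List.foldl_cons,
            show dsgStepA (d, dsgStackRun [] pre) (ln, l, st) =
              (dsgKeyB (d.insert pl v) (ln, l, st),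
               (ln, l) :: dsgPopA l (dsgStackRun [] pre)) by
            simp [dsgStepA, hS, dsgKeyB, hv],
            hS, hstack, List.foldl_cons]
          rw [ih (pre ++ [(ln, l, st)]) (dsgKeyB (d.insert pl v) (ln, l, st)) (by
            intro h' hh'
            rcases List.mem_append.mp hh' with hh | hh
            · exact dsg_contains_keyB _ _ _ (by
                simp [PySem.Dict.contains_insert, hinv h' hh])
            · simp at hh; subst hh; exact dsg_contains_keyB_self _ (ln, l, st))]
          -- now rewrite the B side
          have hplK : (dsgKeyB d (ln, l, st)).contains pl = true := dsg_contains_keyB _ _ _ hpl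
          have hgetD : (t.foldl dsgKeyB (dsgKeyB d (ln, l, st))).getD pl [] = d.getD pl [] := by
            rw [PySem.Dict.getD_eq_get?_getD, dsg_foldl_keyB_get? t _ pl hplK,
              ← PySem.Dict.getD_eq_get?_getD]
            by_cases hc : d.contains ln = true
            · simp [dsgKeyB, hc]
            · have hc' : d.contains ln = false := by simpa using hc
              have hne : pl ≠ ln := fun he => by rw [he, hc'] at hpl; exact Bool.noConfusion hpl
              rw [show dsgKeyB d (ln, l, st) = d.insert ln [] by simp [dsgKeyB, hc']]
              exact PySem.Dict.getD_insert_of_ne _ _ _ hne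
          rw [show dsgBRun pre ((ln, l, st) :: t) (t.foldl dsgKeyB (dsgKeyB d (ln, l, st))) =
              dsgBRun (pre ++ [(ln, l, st)]) t
                ((t.foldl dsgKeyB (dsgKeyB d (ln, l, st))).insert pl
                  ((t.foldl dsgKeyB (dsgKeyB d (ln, l, st))).getD pl [] ++ [ln])) by
            simp [dsgBRun, hg, hgpl]]
          rw [hgetD, ← hv, ← dsg_comm t _ pl v hplK,
            ← dsg_keyB_insert_comm d pl v (ln, l, st) hpl]

theorem dsg_enum (rest pre : List (Int × Int × String)) (d : PySem.Dict Int (List Int)) :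
    (PySem.List.enumerate rest (pre.length : Int)).foldl (dsgChildB (pre ++ rest)) d =
      dsgBRun pre rest d := by
  induction rest generalizing pre d with
  | nil => rfl
  | cons h t ih =>
      rw [PySem.List.enumerate_cons, List.foldl_cons,
        show dsgChildB (pre ++ h :: t) d ((pre.length : Int), h) =
          (match pre.reverse.find? (fun g => g.2.1 < h.2.1) with
           | some g => d.insert g.1 (d.getD g.1 [] ++ [h.1])
           | none => d) by
          simp only [dsgChildB, Int.toNat_natCast]
          rw [List.take_left]]
      have h2 := ih (pre ++ [h]) (match pre.reverse.find? (fun g => g.2.1 < h.2.1) with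
           | some g => d.insert g.1 (d.getD g.1 [] ++ [h.1])
           | none => d)
      simp only [List.append_assoc, List.singleton_append, List.length_append,
        List.length_cons, List.length_nil, Nat.cast_add, Nat.cast_one,
        zero_add] at h2
      rw [h2]
      rfl

-- ===== VERDICT (by name: the statement is the Claim_ definition above) =====
theorem disconnected_sparse_graph_spec : Claim_equal_disconnected_sparse_graph := by
  intro headers _
  unfold Spec_disconnected_sparse_graph disconnected_sparse_graph disconnected_sparse_graph_alt
  have h1 := dsg_main headers [] PySem.Dict.empty (by simp)
  have h2 := dsg_enum headers [] (headers.foldl dsgKeyB PySem.Dict.empty)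
  simp only [List.nil_append, List.length_nil, Int.natCast_zero] at h1 h2
  rw [show dsgStackRun [] [] = [] from rfl] at h1
  rw [h1, ← h2]
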